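-- pv_equiv track=rewrite | github.com/J41RO/MeStore | .workspace/surgical_modifier/functions/insertion/position_calculator.py | _is_inside_function
-- ===== SOURCE A (Python) =====
-- from typing import Union, List, Tuple, Optional, Dict, Any
--
-- def _is_inside_function(lines: List[str], position: int) -> bool:
--     """Verificar si la posición está dentro de una función."""
--     for i in range(position, -1, -1):
--         line = lines[i].strip()
--         if line.startswith('def '):
--             return True
--         elif line.startswith('class ') and not line.endswith(':'):
--             return False
--     return False
-- ===== SOURCE B (Python) =====
-- def _classify(line):
--     """Map a line to its marker: True for 'def ', False for a non-colon 'class ', else None."""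
--     s = line.strip()
--     if s.startswith('def '):
--         return True
--     if s.startswith('class ') and not s.endswith(':'):
--         return False
--     return None
--
-- def _is_inside_function(lines, position):
--     """Classify each line of the prefix once, filter the markers, answer with the last one."""
--     flags = [f for f in map(_classify, (lines[i] for i in range(position + 1))) if f is not None]
--     return flags[-1] if flags else False
-- ===== Notes on version B (the rewrite author's own statement) =====
-- stated objective: alternative
-- what changed: Replaces the backward index scan with early return by a staged pipeline: a helper classifies each prefix line into an Option marker, a comprehension filters the markers into a list, and the answer is that list's last element.
import Mathlib
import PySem

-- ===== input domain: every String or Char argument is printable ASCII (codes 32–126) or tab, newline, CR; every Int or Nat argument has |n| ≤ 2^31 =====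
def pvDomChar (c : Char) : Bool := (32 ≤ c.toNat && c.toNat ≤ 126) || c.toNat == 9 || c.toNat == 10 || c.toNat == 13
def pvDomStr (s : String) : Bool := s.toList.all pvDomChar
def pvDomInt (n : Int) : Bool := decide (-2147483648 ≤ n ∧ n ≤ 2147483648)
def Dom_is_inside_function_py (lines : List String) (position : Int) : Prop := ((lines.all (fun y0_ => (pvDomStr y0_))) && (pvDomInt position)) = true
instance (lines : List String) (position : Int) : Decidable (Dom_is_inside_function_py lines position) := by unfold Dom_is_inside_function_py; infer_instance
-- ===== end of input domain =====

-- B replaces A's backward early-return scan by a staged pipeline (classify each prefix line, filter the markers, take the last); alternative decomposition, same cost.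


-- ===== PORT A =====
-- backward loop over range(position, -1, -1); lines[i] is in range under Pre_, so getD "" is exact there
def isifLoopA (lines : List String) : List Int → Bool
  | [] => false
  | i :: rest =>
    let line := PySem.Str.strip ((PySem.List.pyGet? lines i).getD "")
    if PySem.Str.startswith line "def " then true
    else if PySem.Str.startswith line "class " && !(PySem.Str.endswith line ":") then false
    else isifLoopA lines rest

def is_inside_function_py (lines : List String) (position : Int) : Bool :=
  isifLoopA lines (PySem.List.pyRange position (-1) (-1))

-- ===== PORT B =====
-- _classify: map a line to its marker (some true / some false / none)
def isifClassify (line : String) : Option Bool :=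
  let s := PySem.Str.strip line
  if PySem.Str.startswith s "def " then some true
  else if PySem.Str.startswith s "class " && !(PySem.Str.endswith s ":") then some false
  else none

-- pipeline: classify-and-filter the comprehension over the prefix indices, then last element
def is_inside_function_py_alt (lines : List String) (position : Int) : Bool :=
  let flags := (PySem.List.pyRange 0 (position + 1) 1).filterMap
      (fun i => isifClassify ((PySem.List.pyGet? lines i).getD ""))
  (flags.getLast?).getD false

-- ===== PRECONDITION & SPEC =====
-- Pre_ excludes position ≥ len(lines): there lines[position] raises IndexError in A.
def Pre_is_inside_function_py (lines : List String) (position : Int) : Prop :=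
  position < (lines.length : Int)
instance (lines : List String) (position : Int) : Decidable (Pre_is_inside_function_py lines position) := by unfold Pre_is_inside_function_py; infer_instance

def pvWitness_is_inside_function_py : List String × Int := (["class A:", "  def f():", "    x = 1"], 2)

def Spec_is_inside_function_py (lines : List String) (position : Int) (out : Bool) : Prop := out = is_inside_function_py_alt lines position
instance (lines : List String) (position : Int) (out : Bool) : Decidable (Spec_is_inside_function_py lines position out) := by unfold Spec_is_inside_function_py; infer_instance

-- ===== CLAIM (what is proved, stated in full; the proofs are below) =====
def Claim_equal_is_inside_function_py : Prop := ∀ (lines : List String) (position : Int), Dom_is_inside_function_py lines position → Pre_is_inside_function_py lines position → Spec_is_inside_function_py lines position (is_inside_function_py lines position)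

-- ===== LEMMAS AND PROOFS =====

-- A's per-index step, phrased through the classifier
lemma isifLoopA_cons (lines : List String) (i : Int) (rest : List Int) :
    isifLoopA lines (i :: rest)
      = ((isifClassify ((PySem.List.pyGet? lines i).getD "")).getD (isifLoopA lines rest)) := by
  simp only [isifLoopA, isifClassify]
  split_ifs <;> simp

-- A's backward scan returns the first marker of its index list
lemma isifLoopA_eq_headD (lines : List String) (l : List Int) :
    isifLoopA lines l
      = ((l.filterMap (fun i => isifClassify ((PySem.List.pyGet? lines i).getD ""))).headD false) := by
  induction l with
  | nil => simp [isifLoopA]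
  | cons i rest ih =>
    rw [isifLoopA_cons, List.filterMap_cons]
    rcases h : isifClassify ((PySem.List.pyGet? lines i).getD "") with _ | b <;> simp [ih]

-- ===== VERDICT (by name: the statement is the Claim_ definition above) =====
theorem is_inside_function_py_spec : Claim_equal_is_inside_function_py := by
  intro lines position _ _
  unfold Spec_is_inside_function_py is_inside_function_py is_inside_function_py_alt
  by_cases hneg : position < 0
  · rw [PySem.List.pyRange_neg_one_eq_nil (by omega), PySem.List.pyRange_one_eq_nil (by omega)]
    simp [isifLoopA]
  · show isifLoopA lines (PySem.List.pyRange position (-1) (-1))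
        = (((PySem.List.pyRange 0 (position + 1) 1).filterMap
            (fun i => isifClassify ((PySem.List.pyGet? lines i).getD ""))).getLast?).getD false
    rw [isifLoopA_eq_headD, PySem.List.pyRange_neg_one_eq_reverse,
        List.filterMap_reverse, List.headD_eq_head?_getD, List.head?_reverse,
        show (-1 : Int) + 1 = 0 from rfl]
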